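-- pv_equiv track=rewrite | github.com/maciej3031/00_Exercises | 62_cl_zad4.py | solution
-- ===== SOURCE A (Python) =====
-- def solution(A):
--     res = None
--     for i in range(1, len(A)+1):
--         for j in range(len(A)):
--             temp = abs(sum(A[j:j+i]))
--             if res == None or temp < res:
--                 res = temp
--     return res
-- ===== SOURCE B (Python) =====
-- def solution(A):
--     best = None
--     for j in range(len(A)):
--         s = 0
--         for k in range(j, len(A)):
--             s += A[k]
--             v = abs(s)
--             if best is None or v < best:
--                 best = v
--     return best
-- ===== Notes on version B (the rewrite author's own statement) =====
-- stated objective: faster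
-- what changed: B maintains a running sum per start index (start-major double loop) instead of re-summing every slice for each (length, start) pair in a triple loop.
import Mathlib
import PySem

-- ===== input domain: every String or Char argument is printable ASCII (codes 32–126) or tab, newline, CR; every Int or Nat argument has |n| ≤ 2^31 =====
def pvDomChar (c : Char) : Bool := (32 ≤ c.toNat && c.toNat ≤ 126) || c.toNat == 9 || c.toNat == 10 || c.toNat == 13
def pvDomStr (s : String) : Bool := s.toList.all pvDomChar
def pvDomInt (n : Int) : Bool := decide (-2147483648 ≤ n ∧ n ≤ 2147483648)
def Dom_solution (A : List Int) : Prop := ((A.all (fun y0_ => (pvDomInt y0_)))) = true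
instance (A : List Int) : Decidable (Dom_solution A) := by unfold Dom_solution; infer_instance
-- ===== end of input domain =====

-- B replaces A's triple loop (for every length, for every start, re-sum the slice) by a
-- start-major double loop with a running sum: asymptotically fewer additions, same results.

-- shared helper: the Python line 'if best is None or v < best: best = v', present in both programs
def updMin (res : Option Int) (t : Int) : Option Int :=
  match res with
  | none => some t
  | some r => if t < r then some t else some r

-- ===== PORT A =====
def solution (A : List Int) : Option Int :=
  (PySem.List.pyRange 1 ((A.length : Int) + 1) 1).foldl (fun res i =>
    (PySem.List.pyRange 0 (A.length : Int) 1).foldl (fun res j =>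
      updMin res |(PySem.List.slice A (some j) (some (j + i))).sum|) res) none

-- ===== PORT B =====
def solution_alt (A : List Int) : Option Int :=
  (PySem.List.pyRange 0 (A.length : Int) 1).foldl (fun best j =>
    ((PySem.List.pyRange j (A.length : Int) 1).foldl
      (fun (st : Int × Option Int) k =>
        let s := st.1 + PySem.List.pyGetD A k 0   -- A[k]; k is always in range here
        (s, updMin st.2 |s|)) (0, best)).2) none

-- ===== PRECONDITION & SPEC =====
def Spec_solution (A : List Int) (out : Option Int) : Prop := out = solution_alt A
instance (A : List Int) (out : Option Int) : Decidable (Spec_solution A out) := by unfold Spec_solution; infer_instance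

-- ===== CLAIM (what is proved, stated in full; the proofs are below) =====
def Claim_equal_solution : Prop := ∀ (A : List Int), Dom_solution A → Spec_solution A (solution A)

-- ===== LEMMAS AND PROOFS =====

-- sum of the contiguous segment A[j..k) (Nat indices)
def sumR (A : List Int) (j k : Nat) : Int := ((A.drop j).take (k - j)).sum

-- the abstract value set: |sum of a nonempty contiguous segment|
def valSet (A : List Int) (v : Int) : Prop :=
  ∃ j k : Nat, j < k ∧ k ≤ A.length ∧ v = |sumR A j k|

lemma updMin_some (a t : Int) : updMin (some a) t = some (min a t) := by
  simp only [updMin, min_def]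
  split_ifs with h1 h2 h3 <;> first | rfl | omega

lemma foldl_updMin_some (L : List Int) : ∀ a : Int,
    L.foldl updMin (some a) = some (L.foldl min a) := by
  induction L with
  | nil => intro a; rfl
  | cons x L ih => intro a; simp [List.foldl_cons, updMin_some, ih]

lemma foldl_updMin_none (L : List Int) : L.foldl updMin none = L.min? := by
  cases L with
  | nil => rfl
  | cons a L => simp [List.foldl_cons, updMin, foldl_updMin_some, List.min?]

lemma min?_congr (L₁ L₂ : List Int) (h : ∀ v, v ∈ L₁ ↔ v ∈ L₂) :
    L₁.min? = L₂.min? := by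
  cases h1 : L₁.min? with
  | none =>
    rw [List.min?_eq_none_iff] at h1
    subst h1
    cases h2 : L₂.min? with
    | none => rfl
    | some b =>
      rw [List.min?_eq_some_iff] at h2
      exact absurd ((h b).2 h2.1) (by simp)
  | some a =>
    rw [List.min?_eq_some_iff] at h1
    exact ((List.min?_eq_some_iff).2 ⟨(h a).1 h1.1, fun b hb => h1.2 b ((h b).2 hb)⟩).symm

lemma take_min_length {α : Type} (l : List α) (i : Nat) :
    l.take i = l.take (min i l.length) := by
  by_cases h : i ≤ l.length
  · rw [min_eq_left h]
  · rw [List.take_of_length_le (by omega), min_eq_right (by omega),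
        List.take_of_length_le (le_refl _)]

-- A's value enumeration and B's value enumeration
def valsA (A : List Int) : List Int :=
  (PySem.List.pyRange 1 ((A.length : Int) + 1) 1).flatMap (fun i =>
    (PySem.List.pyRange 0 (A.length : Int) 1).map (fun j =>
      |(PySem.List.slice A (some j) (some (j + i))).sum|))

def valsB (A : List Int) : List Int :=
  (List.range A.length).flatMap (fun j =>
    (List.range (A.length - j)).map (fun t => |sumR A j (j + t + 1)|))

lemma solution_eq_min?_valsA (A : List Int) : solution A = (valsA A).min? := by
  rw [← foldl_updMin_none]
  unfold solution valsA
  rw [List.foldl_flatMap]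
  congr 1
  funext res i
  rw [List.foldl_map]

lemma slice_sum_eq (A : List Int) (jn i : Nat) :
    |(PySem.List.slice A (some (jn : Int)) (some ((jn : Int) + (i : Int)))).sum|
      = |sumR A jn (jn + min i (A.length - jn))| := by
  have h0 : ((jn : Int) + (i : Int)) = ((jn + i : Nat) : Int) := by push_cast; ring
  rw [h0, PySem.List.slice_natCast]
  have h1 : jn + i - jn = i := by omega
  rw [h1]
  unfold sumR
  have h2 : jn + min i (A.length - jn) - jn = min i (A.length - jn) := by omega
  rw [h2]
  have h3 : (A.drop jn).length = A.length - jn := by simp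
  rw [take_min_length (A.drop jn) i, h3]

lemma mem_valsA (A : List Int) (v : Int) : v ∈ valsA A ↔ valSet A v := by
  unfold valsA
  rw [List.mem_flatMap]
  constructor
  · rintro ⟨i, hi, hv⟩
    rw [PySem.List.mem_pyRange_one] at hi
    rw [List.mem_map] at hv
    obtain ⟨j, hj, hv⟩ := hv
    rw [PySem.List.mem_pyRange_one] at hj
    obtain ⟨hj0, hjn⟩ := hj
    obtain ⟨jn, rfl⟩ : ∃ jn : Nat, j = (jn : Int) := ⟨j.toNat, by omega⟩
    obtain ⟨im, rfl⟩ : ∃ im : Nat, i = (im : Int) := ⟨i.toNat, by omega⟩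
    have hjlt : jn < A.length := by exact_mod_cast hjn
    have him : 1 ≤ im := by exact_mod_cast hi.1
    rw [slice_sum_eq A jn im] at hv
    exact ⟨jn, jn + min im (A.length - jn), by omega, by omega, hv.symm⟩
  · rintro ⟨j, k, hjk, hk, rfl⟩
    refine ⟨((k - j : Nat) : Int), ?_, ?_⟩
    · rw [PySem.List.mem_pyRange_one]
      refine ⟨by exact_mod_cast Nat.one_le_iff_ne_zero.2 (by omega), by omega⟩
    · rw [List.mem_map]
      refine ⟨((j : Nat) : Int), ?_, ?_⟩
      · rw [PySem.List.mem_pyRange_one]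
        exact ⟨by exact_mod_cast Nat.zero_le j, by exact_mod_cast (by omega : j < A.length)⟩
      · rw [slice_sum_eq A j (k - j)]
        have : j + min (k - j) (A.length - j) = k := by omega
        rw [this]

lemma mem_valsB (A : List Int) (v : Int) : v ∈ valsB A ↔ valSet A v := by
  unfold valsB valSet
  rw [List.mem_flatMap]
  constructor
  · rintro ⟨j, hj, hv⟩
    rw [List.mem_range] at hj
    rw [List.mem_map] at hv
    obtain ⟨t, ht, rfl⟩ := hv
    rw [List.mem_range] at ht
    exact ⟨j, j + t + 1, by omega, by omega, rfl⟩
  · rintro ⟨j, k, hjk, hk, rfl⟩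
    refine ⟨j, List.mem_range.2 (by omega), List.mem_map.2 ⟨k - j - 1, List.mem_range.2 (by omega), ?_⟩⟩
    have : j + (k - j - 1) + 1 = k := by omega
    rw [this]

lemma sumR_succ (A : List Int) (j m : Nat) (h : j + m < A.length) :
    sumR A j (j + m + 1) = sumR A j (j + m) + A.getD (j + m) 0 := by
  unfold sumR
  have h1 : j + m + 1 - j = (j + m - j) + 1 := by omega
  rw [h1, List.take_add_one, List.sum_append]
  congr 1
  have h2 : j + m - j = m := by omega
  rw [h2, List.getElem?_drop]
  simp [List.getD, List.getElem?_eq_getElem h]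

lemma innerB (A : List Int) (jn : Nat) : ∀ (m : Nat), jn + m ≤ A.length → ∀ (b : Option Int),
    (PySem.List.pyRange (jn : Int) ((jn : Int) + (m : Int)) 1).foldl
      (fun (st : Int × Option Int) k =>
        let s := st.1 + PySem.List.pyGetD A k 0
        (s, updMin st.2 |s|)) (0, b)
    = (sumR A jn (jn + m),
       (List.range m).foldl (fun o t => updMin o |sumR A jn (jn + t + 1)|) b) := by
  intro m
  induction m with
  | zero =>
    intro _ b
    rw [show ((jn : Int) + ((0 : Nat) : Int)) = (jn : Int) by push_cast; ring,
        PySem.List.pyRange_one_eq_nil (le_refl _)]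
    simp [sumR]
  | succ m ih =>
    intro hm b
    have hsplit : (jn : Int) + ((m + 1 : Nat) : Int) = ((jn : Int) + (m : Int)) + 1 := by
      push_cast; ring
    rw [hsplit, PySem.List.pyRange_one_succ_right (by omega),
        List.foldl_append, ih (by omega) b, List.range_succ, List.foldl_append]
    simp only [List.foldl_cons, List.foldl_nil]
    have hcast : ((jn : Int) + (m : Int)) = ((jn + m : Nat) : Int) := by push_cast; ring
    rw [hcast, PySem.List.pyGetD_natCast]
    show (sumR A jn (jn + m) + A.getD (jn + m) 0,
          updMin ((List.range m).foldl (fun o t => updMin o |sumR A jn (jn + t + 1)|) b)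
            |sumR A jn (jn + m) + A.getD (jn + m) 0|) = _
    rw [← sumR_succ A jn m (by omega)]
    rfl

lemma solution_alt_eq_min?_valsB (A : List Int) : solution_alt A = (valsB A).min? := by
  rw [← foldl_updMin_none]
  unfold valsB
  rw [List.foldl_flatMap]
  unfold solution_alt
  rw [PySem.List.pyRange_one 0 (A.length : Int)]
  have hz : ((A.length : Int) - 0).toNat = A.length := by omega
  rw [hz, List.foldl_map]
  apply PySem.List.foldl_congr_mem
  intro best k hk
  rw [List.mem_range] at hk
  have h1 : (0 : Int) + (k : Int) = ((k : Nat) : Int) := by omega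
  have h2 : (A.length : Int) = ((k : Nat) : Int) + ((A.length - k : Nat) : Int) := by
    omega
  rw [h1, h2, innerB A k (A.length - k) (by omega) best, List.foldl_map]

-- ===== VERDICT (by name: the statement is the Claim_ definition above) =====
theorem solution_spec : Claim_equal_solution := by
  intro A _
  unfold Spec_solution
  rw [solution_eq_min?_valsA, solution_alt_eq_min?_valsB]
  exact min?_congr _ _ (fun v => (mem_valsA A v).trans (mem_valsB A v).symm)
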